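-- pv_equiv track=rewrite | github.com/pypi-data/pypi-mirror-290 | packages/PyListFunctions/PyListFunctions-0.7.0-py3-none-any.whl/PyListFunctions/__init__.py | index_len
-- ===== SOURCE A (Python) =====
-- def index_len(__obj) -> int:
--     """
--     Return the number of items in a container(= len(__obj)-1)
--     :param __obj
--     :return
--     """
--
--     i: int = -1
--     if isinstance(__obj, list) or isinstance(__obj, dict) or isinstance(__obj, set):
--         __obj = iter(__obj.copy())
--     while True:
--         try:
--             next(__obj)
--             i += 1
--         except StopIteration:
--             return i
-- ===== SOURCE B (Python) =====
-- def index_len(__obj) -> int: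
--     """
--     Return the number of items in a container(= len(__obj)-1)
--     :param __obj
--     :return
--     """
--     if isinstance(__obj, (list, dict, set)):
--         return len(__obj) - 1
--     count = 0
--     while True:
--         try:
--             next(__obj)
--             count += 1
--         except StopIteration:
--             return count - 1
-- ===== Notes on version B (the rewrite author's own statement) =====
-- stated objective: simpler
-- what changed: For list/dict/set arguments B returns len(__obj)-1 in closed form instead of copying the container and counting via a next() loop; non-containers keep a direct next() counting loop so iterators are consumed and non-iterables still raise TypeError.
import Mathlib
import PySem

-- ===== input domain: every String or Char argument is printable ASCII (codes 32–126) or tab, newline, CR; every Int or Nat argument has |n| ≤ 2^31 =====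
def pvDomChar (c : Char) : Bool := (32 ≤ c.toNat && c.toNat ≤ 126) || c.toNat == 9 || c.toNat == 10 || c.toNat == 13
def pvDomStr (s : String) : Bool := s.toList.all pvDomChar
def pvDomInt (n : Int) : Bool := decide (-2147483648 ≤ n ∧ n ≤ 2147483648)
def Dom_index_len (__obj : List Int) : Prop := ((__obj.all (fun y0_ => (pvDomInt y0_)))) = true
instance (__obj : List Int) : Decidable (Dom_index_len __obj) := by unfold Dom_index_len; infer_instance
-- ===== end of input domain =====

-- B returns len(__obj)-1 in closed form for the list argument; A copies and counts with a next() loop.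
-- (For a list argument both are pure; A's copy/iteration has no observable side effect here.)

-- ===== PORT A =====
-- A: i = -1; iterate over a copy of the list, i += 1 per element; return i at StopIteration.
def index_len (__obj : List Int) : Int :=
  __obj.foldl (fun i _ => i + 1) (-1)

-- ===== PORT B =====
-- B: closed form len - 1.
def index_len_alt (__obj : List Int) : Int :=
  (__obj.length : Int) - 1

-- ===== PRECONDITION & SPEC =====
def Spec_index_len (__obj : List Int) (out : Int) : Prop := out = index_len_alt __obj
instance (__obj : List Int) (out : Int) : Decidable (Spec_index_len __obj out) := by unfold Spec_index_len; infer_instance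

-- ===== CLAIM (what is proved, stated in full; the proofs are below) =====
def Claim_equal_index_len : Prop := ∀ (__obj : List Int), Dom_index_len __obj → Spec_index_len __obj (index_len __obj)

-- ===== LEMMAS AND PROOFS =====
theorem index_len_foldl (l : List Int) (a : Int) :
    l.foldl (fun i _ => i + 1) a = a + l.length := by
  induction l generalizing a with
  | nil => simp
  | cons x xs ih => simp [List.foldl, ih]; push_cast; ring

-- ===== VERDICT (by name: the statement is the Claim_ definition above) =====
theorem index_len_spec : Claim_equal_index_len := by
  intro l _
  unfold Spec_index_len index_len index_len_alt
  rw [index_len_foldl]; ring
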